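-- pv_equiv track=rewrite | github.com/huangpd/hawker | hawker_agent/agent/executor.py | _clean_traceback
-- ===== SOURCE A (Python) =====
-- def _clean_traceback(tb_str: str) -> str:
--     """通过移除执行器内部框架来清理回溯 (traceback) 字符串。
--
--     重点关注从执行的代码块开始的框架。
--
--     Args:
--         tb_str (str): 原始的回溯字符串。
--
--     Returns:
--         str: 清理后的回溯字符串。
--     """
--     lines = tb_str.split("\n")
--     cleaned = []
--     # 关注点是从 <hawker-cell> 开始的报错
--     found_cell = False
--     for line in lines:
--         if '<hawker-cell>' in line:
--             found_cell = True
--         if found_cell: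
--             cleaned.append(line)
--
--     if not cleaned:
--         return tb_str
--     return "Traceback (most recent call last):\n" + "\n".join(cleaned)
-- ===== SOURCE B (Python) =====
-- def _clean_traceback(tb_str: str) -> str:
--     lines = tb_str.split("\n")
--     for i, line in enumerate(lines):
--         if '<hawker-cell>' in line:
--             return "Traceback (most recent call last):\n" + "\n".join(lines[i:])
--     return tb_str
-- ===== Notes on version B (the rewrite author's own statement) =====
-- stated objective: simpler
-- what changed: B replaces A's flag-toggling accumulation over every line with an early-returning search for the first marker line followed by a single slice+join of the line list.
import Mathlib
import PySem

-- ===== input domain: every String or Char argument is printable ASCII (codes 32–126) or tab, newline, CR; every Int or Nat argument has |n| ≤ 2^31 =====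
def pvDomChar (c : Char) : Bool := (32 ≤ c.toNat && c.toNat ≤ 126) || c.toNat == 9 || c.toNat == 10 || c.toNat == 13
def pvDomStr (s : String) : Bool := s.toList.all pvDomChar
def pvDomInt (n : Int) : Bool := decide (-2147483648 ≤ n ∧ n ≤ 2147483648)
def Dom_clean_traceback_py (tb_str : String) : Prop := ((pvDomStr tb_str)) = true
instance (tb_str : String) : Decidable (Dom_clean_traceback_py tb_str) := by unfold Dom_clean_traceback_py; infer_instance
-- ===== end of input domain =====

-- B replaces A's full flag-toggling accumulation pass by an early-returning search for the
-- first marker line followed by one slice+join (objective: simpler).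

def pvMarker : List Char := "<hawker-cell>".toList
def pvHeader : List Char := "Traceback (most recent call last):\n".toList

-- ===== PORT A =====
def clean_traceback_py (tb_str : String) : String :=
  let lines := PySem.Chars.splitOn tb_str.toList ['\n']
  let st := lines.foldl (fun (st : Bool × List (List Char)) line =>
      let found := if PySem.Chars.isIn pvMarker line then true else st.1
      (found, if found then st.2 ++ [line] else st.2)) (false, [])
  if st.2 = [] then tb_str
  else String.ofList (pvHeader ++ PySem.Chars.join ['\n'] st.2)

-- ===== PORT B =====
-- the 'for i, line in enumerate(lines): if marker in line: return …lines[i:]' loop: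
-- first-match suffix of the line list, none = loop fell through
def pvAltGo : List (List Char) → Option (List (List Char))
  | [] => none
  | l :: rest => if PySem.Chars.isIn pvMarker l then some (l :: rest) else pvAltGo rest

def clean_traceback_py_alt (tb_str : String) : String :=
  match pvAltGo (PySem.Chars.splitOn tb_str.toList ['\n']) with
  | none => tb_str
  | some suf => String.ofList (pvHeader ++ PySem.Chars.join ['\n'] suf)

-- ===== PRECONDITION & SPEC =====
def Spec_clean_traceback_py (tb_str : String) (out : String) : Prop := out = clean_traceback_py_alt tb_str
instance (tb_str : String) (out : String) : Decidable (Spec_clean_traceback_py tb_str out) := by unfold Spec_clean_traceback_py; infer_instance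

-- ===== CLAIM (what is proved, stated in full; the proofs are below) =====
def Claim_equal_clean_traceback_py : Prop := ∀ (tb_str : String), Dom_clean_traceback_py tb_str → Spec_clean_traceback_py tb_str (clean_traceback_py tb_str)

-- ===== LEMMAS AND PROOFS =====

-- once the flag is true, A's loop appends every remaining line
theorem pv_fold_true (ls : List (List Char)) (acc : List (List Char)) :
    ls.foldl (fun (st : Bool × List (List Char)) line =>
      let found := if PySem.Chars.isIn pvMarker line then true else st.1
      (found, if found then st.2 ++ [line] else st.2)) (true, acc) = (true, acc ++ ls) := by
  induction ls generalizing acc with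
  | nil => simp
  | cons l rest ih =>
      rw [List.foldl_cons]
      cases h : PySem.Chars.isIn pvMarker l
      all_goals
        show List.foldl (fun (st : Bool × List (List Char)) line =>
      let found := if PySem.Chars.isIn pvMarker line then true else st.1
      (found, if found then st.2 ++ [line] else st.2)) (true, acc ++ [l]) rest = (true, acc ++ l :: rest)
      all_goals rw [ih]; simp

-- from a cold start, A's loop state is exactly B's first-match suffix
theorem pv_fold_eq_altGo (ls : List (List Char)) :
    ls.foldl (fun (st : Bool × List (List Char)) line =>
      let found := if PySem.Chars.isIn pvMarker line then true else st.1
      (found, if found then st.2 ++ [line] else st.2)) (false, []) =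
    (match pvAltGo ls with
     | none => ((false : Bool), ([] : List (List Char)))
     | some suf => (true, suf)) := by
  induction ls with
  | nil => simp [pvAltGo]
  | cons l rest ih =>
      rw [List.foldl_cons]
      cases h : PySem.Chars.isIn pvMarker l
      · show List.foldl (fun (st : Bool × List (List Char)) line =>
      let found := if PySem.Chars.isIn pvMarker line then true else st.1
      (found, if found then st.2 ++ [line] else st.2)) (false, []) rest = _
        rw [show pvAltGo (l :: rest) = pvAltGo rest from by simp [pvAltGo, h]]
        exact ih
      · show List.foldl (fun (st : Bool × List (List Char)) line =>
      let found := if PySem.Chars.isIn pvMarker line then true else st.1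
      (found, if found then st.2 ++ [line] else st.2)) (true, [l]) rest = _
        rw [pv_fold_true, show pvAltGo (l :: rest) = some (l :: rest) from by simp [pvAltGo, h]]
        simp

theorem pv_altGo_ne_nil (ls suf : List (List Char)) (h : pvAltGo ls = some suf) : suf ≠ [] := by
  induction ls with
  | nil => simp [pvAltGo] at h
  | cons l rest ih =>
      by_cases hm : PySem.Chars.isIn pvMarker l = true
      · simp [pvAltGo, hm] at h; simp [← h]
      · simp only [pvAltGo, hm, if_neg, Bool.not_eq_true] at h
        simp at hm
        exact ih (by simpa [hm] using h)

-- ===== VERDICT (by name: the statement is the Claim_ definition above) =====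
theorem clean_traceback_py_spec : Claim_equal_clean_traceback_py := by
  intro tb_str _
  unfold Spec_clean_traceback_py clean_traceback_py clean_traceback_py_alt
  simp only [pv_fold_eq_altGo]
  cases h : pvAltGo (PySem.Chars.splitOn tb_str.toList ['\n']) with
  | none => simp
  | some suf => simp [pv_altGo_ne_nil _ _ h]
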